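-- pv_equiv track=rewrite | github.com/Swapnil565/Vektor- | vektor/core/engine.py | _prioritize_attacks_for_analysis
-- ===== SOURCE A (Python) =====
-- from typing import List, Dict, Optional
--
-- def _prioritize_attacks_for_analysis(attacks: List[str]) -> List[str]:
--     preferred_prefixes = (
--         "system_prompt_reveal",
--         "training_data_probe",
--         "pii_leakage",
--         "delimiter_confusion",
--         "direct_injection",
--         "system_override",
--         "role_manipulation",
--     )
--     prioritized = [a for a in attacks if a.startswith(preferred_prefixes)]
--     remaining = [a for a in attacks if a not in prioritized]
--     return prioritized + remaining
-- ===== SOURCE B (Python) =====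
-- from typing import List
--
-- _PREFERRED_PREFIXES = (
--     "system_prompt_reveal",
--     "training_data_probe",
--     "pii_leakage",
--     "delimiter_confusion",
--     "direct_injection",
--     "system_override",
--     "role_manipulation",
-- )
--
-- def _prioritize_attacks_for_analysis(attacks: List[str]) -> List[str]:
--     # One stable keyed sort: preferred-prefix attacks first, original order kept within each group.
--     return sorted(attacks, key=lambda a: 0 if a.startswith(_PREFERRED_PREFIXES) else 1)
-- ===== Notes on version B (the rewrite author's own statement) =====
-- stated objective: idiomatic
-- what changed: Replaced the two list-comprehension partitions (the second doing an O(n) membership scan of the prioritized list per element) with a single stable sort keyed on a 0/1 preferred-prefix flag.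
import Mathlib
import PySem

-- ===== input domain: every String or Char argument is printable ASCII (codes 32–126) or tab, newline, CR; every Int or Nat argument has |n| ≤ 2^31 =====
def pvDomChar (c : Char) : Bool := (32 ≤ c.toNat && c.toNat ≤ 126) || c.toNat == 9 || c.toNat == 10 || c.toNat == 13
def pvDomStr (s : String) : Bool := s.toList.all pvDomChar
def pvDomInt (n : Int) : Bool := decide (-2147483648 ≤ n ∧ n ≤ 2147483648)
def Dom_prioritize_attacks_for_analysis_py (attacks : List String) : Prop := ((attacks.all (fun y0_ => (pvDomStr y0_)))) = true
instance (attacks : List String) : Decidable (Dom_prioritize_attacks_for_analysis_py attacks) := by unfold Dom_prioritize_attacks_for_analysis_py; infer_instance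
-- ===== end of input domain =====

-- B is a single stable keyed sort instead of A's two partition passes (idiomatic; return value only, no mutation).

-- ===== PORT A =====
-- the tuple 'preferred_prefixes'; 'a.startswith(tuple)' is 'any prefix matches'
def pvPreferredPrefixes : List String :=
  ["system_prompt_reveal", "training_data_probe", "pii_leakage", "delimiter_confusion",
   "direct_injection", "system_override", "role_manipulation"]

def pvIsPreferred (a : String) : Bool :=
  pvPreferredPrefixes.any (fun p => PySem.Str.startswith a p)

def prioritize_attacks_for_analysis_py (attacks : List String) : List String :=
  let prioritized := attacks.filter (fun a => pvIsPreferred a)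
  let remaining := attacks.filter (fun a => !(prioritized.contains a))
  prioritized ++ remaining

-- ===== PORT B =====
def prioritize_attacks_for_analysis_py_alt (attacks : List String) : List String :=
  PySem.List.sorted attacks (fun a => if pvIsPreferred a then (0 : Int) else 1) false

-- ===== PRECONDITION & SPEC =====
def Spec_prioritize_attacks_for_analysis_py (attacks : List String) (out : List String) : Prop := out = prioritize_attacks_for_analysis_py_alt attacks
instance (attacks : List String) (out : List String) : Decidable (Spec_prioritize_attacks_for_analysis_py attacks out) := by unfold Spec_prioritize_attacks_for_analysis_py; infer_instance

-- ===== CLAIM (what is proved, stated in full; the proofs are below) =====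
def Claim_equal_prioritize_attacks_for_analysis_py : Prop := ∀ (attacks : List String), Dom_prioritize_attacks_for_analysis_py attacks → Spec_prioritize_attacks_for_analysis_py attacks (prioritize_attacks_for_analysis_py attacks)

-- ===== LEMMAS AND PROOFS =====

-- key used by B
def pvKey (a : String) : Int := if pvIsPreferred a then 0 else 1

-- inserting into a partitioned accumulator keeps it partitioned
theorem pv_insertBy_partition (x : String) (F G : List String)
    (hF : ∀ a ∈ F, pvIsPreferred a = true) (hG : ∀ a ∈ G, pvIsPreferred a = false) :
    PySem.List.insertBy (fun a b => decide (pvKey a < pvKey b)) x (F ++ G) =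
      if pvIsPreferred x then F ++ x :: G else F ++ G ++ [x] := by
  induction F with
  | nil =>
    simp only [List.nil_append]
    induction G with
    | nil =>
      by_cases hx : pvIsPreferred x <;> simp [PySem.List.insertBy, hx]
    | cons g gs ih =>
      have hg : pvIsPreferred g = false := hG g (by simp)
      by_cases hx : pvIsPreferred x
      · simp [PySem.List.insertBy, pvKey, hx, hg]
      · have ih' := ih (fun a ha => hG a (by simp [ha]))
        rw [if_neg hx] at ih'
        simp only [pvKey] at ih' ⊢
        simp [PySem.List.insertBy, hx, hg, ih']
  | cons f fs ih =>
    have hf : pvIsPreferred f = true := hF f (by simp)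
    have := ih (fun a ha => hF a (by simp [ha]))
    by_cases hx : pvIsPreferred x <;>
      simp_all [PySem.List.insertBy, pvKey]

-- the foldl of insertBy over a 0/1 key is the stable partition
theorem pv_foldl_partition (xs : List String) (F G : List String)
    (hF : ∀ a ∈ F, pvIsPreferred a = true) (hG : ∀ a ∈ G, pvIsPreferred a = false) :
    xs.foldl (fun acc x => PySem.List.insertBy (fun a b => decide (pvKey a < pvKey b)) x acc) (F ++ G)
      = (F ++ xs.filter (fun a => pvIsPreferred a)) ++ (G ++ xs.filter (fun a => !pvIsPreferred a)) := by
  induction xs generalizing F G with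
  | nil => simp
  | cons x xs ih =>
    simp only [List.foldl_cons]
    rw [pv_insertBy_partition x F G hF hG]
    by_cases hx : pvIsPreferred x
    · have h1 : F ++ x :: G = (F ++ [x]) ++ G := by simp
      rw [if_pos hx, h1, ih (F ++ [x]) G
        (by intro a ha; rcases List.mem_append.1 ha with h | h
            · exact hF a h
            · simp at h; subst h; exact hx) hG]
      simp [hx]
    · have hx' : pvIsPreferred x = false := by simpa using hx
      rw [if_neg hx, List.append_assoc, ih F (G ++ [x]) hF
        (by intro a ha; rcases List.mem_append.1 ha with h | h
            · exact hG a h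
            · simp at h; subst h; exact hx')]
      simp [hx']

theorem pv_sorted_eq_partition (xs : List String) :
    prioritize_attacks_for_analysis_py_alt xs
      = xs.filter (fun a => pvIsPreferred a) ++ xs.filter (fun a => !pvIsPreferred a) := by
  unfold prioritize_attacks_for_analysis_py_alt
  rw [show (fun a : String => if pvIsPreferred a then (0 : Int) else 1) = pvKey from rfl]
  rw [PySem.List.sorted_eq_foldl_insertBy]
  have := pv_foldl_partition xs [] [] (by simp) (by simp)
  simpa using this

-- A's 'not in prioritized' test agrees with the negated prefix test on elements of the list
theorem pv_remaining_eq (xs : List String) :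
    xs.filter (fun a => !((xs.filter (fun b => pvIsPreferred b)).contains a))
      = xs.filter (fun a => !pvIsPreferred a) := by
  apply List.filter_congr
  intro a ha
  by_cases h : pvIsPreferred a
  · have hmem : a ∈ xs.filter (fun b => pvIsPreferred b) := List.mem_filter.2 ⟨ha, h⟩
    simp [hmem, h]
  · have hnmem : a ∉ xs.filter (fun b => pvIsPreferred b) := by
      intro hc
      exact absurd (List.of_mem_filter hc) (by simpa using h)
    simp [hnmem, h]

-- ===== VERDICT (by name: the statement is the Claim_ definition above) =====
theorem prioritize_attacks_for_analysis_py_spec : Claim_equal_prioritize_attacks_for_analysis_py := by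
  intro attacks _
  unfold Spec_prioritize_attacks_for_analysis_py prioritize_attacks_for_analysis_py
  simp only []
  rw [pv_sorted_eq_partition, pv_remaining_eq]
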